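-- pv_equiv track=rewrite | github.com/jonechelon/govai-hub | src/utils/celo_token_registry.py | _hint_tokens_ordered
-- ===== SOURCE A (Python) =====
-- CELO_MAINNET_TOKENS: dict[str, str] = {
--     # L1 / gas / governance (CELO ERC-20 mirrors native)
--     "CELO": "0x471EcE3750Da237f93B8E339c536989b8978a438",
--     # Liquid staking receipt (AMM swaps — NOT StakedCelo Account 0x4aAD…)
--     "STCELO": "0xC668583dcbDc9ae6FA3CE46462758188adfdfC24",
--     "SCELO": "0xC668583dcbDc9ae6FA3CE46462758188adfdfC24",
--     # Mento / stables (cUSD legacy address = “USDm” label in older bot copy)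
--     "USDm": "0x765DE816845861e75a25fca122bb6898B8B1282a",
--     "CUSD": "0x765DE816845861e75a25fca122bb6898B8B1282a",
--     "CEUR": "0xD8763CBa276a3738E6DE85b4b3bF5FDed6D6cA73",
--     "CREAL": "0xe8537a3d056DA446677B9E9d6c5dB704EaAb4787",
--     # Mento regional (on-chain symbol eXOFx; use alias ``EXOF`` → ``EXOFX``)
--     "EXOFX": "0x06b6E03Bc9711eeb58D5A381a476019E19FDDEc4",
--     "CKES": "0x456a3D042C0DbD3db53D5489e98dFb038553B0d0",
--     # Fiat / majors
--     "USDC": "0xceba9300f2b948710d2653dD7B07f33A8B32118C",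
--     "USDT": "0x48065fbBE25f71C9282ddf5e1cD6D6A887483D5e",
--     # Bridged / wrapped
--     "WETH": "0xD221812de1BD094f35587EE8E174B07B6167D9Af",
--     "WBTC": "0x8aC2901Dd8A1F17a1A4768A6bA4C3751e3995B2D",
--     "AXLUSDC": "0xEB466342C4d449BC9f53A865D5Cb90586f405215",
--     "AXLETH": "0xb829b68f57CC546dA7E5806A929e53bE32a4625D",
--     "WBNB": "0xBf2554ce8A4D1351AFeB1aC3E5545AaF7591042d",
--     "WAVAX": "0xFFdb274b4909fC2efE26C8e4Ddc9fe91963cAA4d",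
--     "WFTM": "0xd1A342eE2210238233a347FEd61EE7Faf9f251ce",
--     "WMATIC": "0x9C234706292b1144133ED509ccc5B3CD193BF712",
--     # DeFi / ecosystem (Celo Blockscout-verified)
--     "UBE": "0x71e26d0E519D14591b9dE9a0fE9513A398101490",
--     "MOO": "0x17700282592D6917F6A73D0bF8AcCf4D578c131e",
--     "UNI": "0xeE571697998ec64e32B57D754D700c4dda2f2a0e",
--     "SUSHI": "0x29dFce9c22003A4999930382Fd00f9Fd6133Acd1",
--     "CRV": "0x173fd7434B8B50dF08e3298f173487ebDB35FD14",
--     "SYMM": "0x8427bD503dd3169cCC9aFF7326c15258Bc305478",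
--     "HALOFI": "0xA553FeDB4EEc005C0480172199B0B24307FFd0Ae",
--     "ARI": "0x745f233f80F7ddA3073755e50Fa32F4B8A6A1574",
--     "PACT": "0x46c9757C5497c5B1f2eb73aE79b6B67D119B0B58",
--     # Glo Dollar (symbol on-chain USDGLO — alias GLO for UX)
--     "USDGLO": "0x4F604735c1cF31399C6E711D5962b2B3E0225AD3",
--     "GLO": "0x4F604735c1cF31399C6E711D5962b2B3E0225AD3",
--     # ReFi / carbon / GoodDollar (G on-chain)
--     "G": "0x62B8B11039FcfE5aB0C56E502b1C372A3d2a9c7A",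
--     "NCT": "0x02De4766C272abc10Bc88c220D214A26960a7e92",
--     "MCO2": "0x7Ff9DF85a856DB9CD644Ce4032fdf60a7Ad8B0Cc",
--     "CMCO2": "0x32A9FE697a32135BFd313a6Ac28792DaE4D9979d",
--     "PLASTIK": "0x27cd006548dF7C8c8e9fdc4A67fa05C2E3CA5CF9",
--     # Microtasks / data economy
--     "JMPT": "0x1d18d0386F51ab03E7E84E71BdA1681EbA865F1f",
-- }
--
-- TOKEN_SYMBOL_ALIASES: dict[str, str] = {
--     "CUSD": "USDm",
--     "STABLE": "USDm",
--     "CUSDT": "USDT",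
--     "ETH": "WETH",
--     "BTC": "WBTC",
--     "SYRUP": "SYMM",
--     "HALO": "HALOFI",
--     "EXOF": "EXOFX",
--     "GD": "G",
--     "G$": "G",
--     "GOODDOLLAR": "G",
-- }
--
-- def _hint_tokens_ordered(groq_hint: str) -> list[str]:
--     """Extract distinct registry symbols from free text (longest-token greedy scan)."""
--     hint = (groq_hint or "").upper()
--     needles: list[tuple[str, str]] = []
--     for k in CELO_MAINNET_TOKENS:
--         if len(k) >= 3:
--             needles.append((k, k))
--     for alias, canon in TOKEN_SYMBOL_ALIASES.items():
--         if len(alias) >= 3 and canon in CELO_MAINNET_TOKENS: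
--             needles.append((alias, canon))
--     needles.sort(key=lambda x: len(x[0]), reverse=True)
--
--     ordered: list[str] = []
--     seen: set[str] = set()
--     pos = 0
--     while pos < len(hint):
--         matched: tuple[str, str] | None = None
--         for needle, canon in needles:
--             if hint.startswith(needle, pos):
--                 matched = (needle, canon)
--                 break
--         if matched is not None:
--             _, canon = matched
--             if canon not in seen:
--                 seen.add(canon)
--                 ordered.append(canon)
--             pos += len(matched[0])
--         else:
--             pos += 1
--     return ordered
-- ===== SOURCE B (Python) =====
-- CELO_MAINNET_TOKENS: dict[str, str] = {
--     "CELO": "0x471EcE3750Da237f93B8E339c536989b8978a438",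
--     "STCELO": "0xC668583dcbDc9ae6FA3CE46462758188adfdfC24",
--     "SCELO": "0xC668583dcbDc9ae6FA3CE46462758188adfdfC24",
--     "USDm": "0x765DE816845861e75a25fca122bb6898B8B1282a",
--     "CUSD": "0x765DE816845861e75a25fca122bb6898B8B1282a",
--     "CEUR": "0xD8763CBa276a3738E6DE85b4b3bF5FDed6D6cA73",
--     "CREAL": "0xe8537a3d056DA446677B9E9d6c5dB704EaAb4787",
--     "EXOFX": "0x06b6E03Bc9711eeb58D5A381a476019E19FDDEc4",
--     "CKES": "0x456a3D042C0DbD3db53D5489e98dFb038553B0d0",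
--     "USDC": "0xceba9300f2b948710d2653dD7B07f33A8B32118C",
--     "USDT": "0x48065fbBE25f71C9282ddf5e1cD6D6A887483D5e",
--     "WETH": "0xD221812de1BD094f35587EE8E174B07B6167D9Af",
--     "WBTC": "0x8aC2901Dd8A1F17a1A4768A6bA4C3751e3995B2D",
--     "AXLUSDC": "0xEB466342C4d449BC9f53A865D5Cb90586f405215",
--     "AXLETH": "0xb829b68f57CC546dA7E5806A929e53bE32a4625D",
--     "WBNB": "0xBf2554ce8A4D1351AFeB1aC3E5545AaF7591042d",
--     "WAVAX": "0xFFdb274b4909fC2efE26C8e4Ddc9fe91963cAA4d",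
--     "WFTM": "0xd1A342eE2210238233a347FEd61EE7Faf9f251ce",
--     "WMATIC": "0x9C234706292b1144133ED509ccc5B3CD193BF712",
--     "UBE": "0x71e26d0E519D14591b9dE9a0fE9513A398101490",
--     "MOO": "0x17700282592D6917F6A73D0bF8AcCf4D578c131e",
--     "UNI": "0xeE571697998ec64e32B57D754D700c4dda2f2a0e",
--     "SUSHI": "0x29dFce9c22003A4999930382Fd00f9Fd6133Acd1",
--     "CRV": "0x173fd7434B8B50dF08e3298f173487ebDB35FD14",
--     "SYMM": "0x8427bD503dd3169cCC9aFF7326c15258Bc305478",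
--     "HALOFI": "0xA553FeDB4EEc005C0480172199B0B24307FFd0Ae",
--     "ARI": "0x745f233f80F7ddA3073755e50Fa32F4B8A6A1574",
--     "PACT": "0x46c9757C5497c5B1f2eb73aE79b6B67D119B0B58",
--     "USDGLO": "0x4F604735c1cF31399C6E711D5962b2B3E0225AD3",
--     "GLO": "0x4F604735c1cF31399C6E711D5962b2B3E0225AD3",
--     "G": "0x62B8B11039FcfE5aB0C56E502b1C372A3d2a9c7A",
--     "NCT": "0x02De4766C272abc10Bc88c220D214A26960a7e92",
--     "MCO2": "0x7Ff9DF85a856DB9CD644Ce4032fdf60a7Ad8B0Cc",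
--     "CMCO2": "0x32A9FE697a32135BFd313a6Ac28792DaE4D9979d",
--     "PLASTIK": "0x27cd006548dF7C8c8e9fdc4A67fa05C2E3CA5CF9",
--     "JMPT": "0x1d18d0386F51ab03E7E84E71BdA1681EbA865F1f",
-- }
--
-- TOKEN_SYMBOL_ALIASES: dict[str, str] = {
--     "CUSD": "USDm",
--     "STABLE": "USDm",
--     "CUSDT": "USDT",
--     "ETH": "WETH",
--     "BTC": "WBTC",
--     "SYRUP": "SYMM",
--     "HALO": "HALOFI",
--     "EXOF": "EXOFX",
--     "GD": "G",
--     "G$": "G",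
--     "GOODDOLLAR": "G",
-- }
--
--
-- def _hint_tokens_ordered(groq_hint: str) -> list[str]:
--     """Extract distinct registry symbols from free text (longest-token greedy scan)."""
--     # needle -> canonical symbol; setdefault keeps the first (token) mapping on duplicates
--     table: dict[str, str] = {}
--     for k in CELO_MAINNET_TOKENS:
--         if len(k) >= 3:
--             table.setdefault(k, k)
--     for alias, canon in TOKEN_SYMBOL_ALIASES.items():
--         if len(alias) >= 3 and canon in CELO_MAINNET_TOKENS:
--             table.setdefault(alias, canon)
--     lengths = sorted({len(k) for k in table}, reverse=True)
--
--     hint = (groq_hint or "").upper()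
--     n = len(hint)
--     ordered: list[str] = []
--     seen: set[str] = set()
--     pos = 0
--     while pos < n:
--         step = 1
--         for L in lengths:
--             if pos + L <= n:
--                 canon = table.get(hint[pos:pos + L])
--                 if canon is not None:
--                     if canon not in seen:
--                         seen.add(canon)
--                         ordered.append(canon)
--                     step = L
--                     break
--         pos += step
--     return ordered
-- ===== Notes on version B (the rewrite author's own statement) =====
-- stated objective: faster
-- what changed: A scans the whole length-sorted needle list (44 startswith tests) at every text position; B builds a needle->canon hash table once and does one substring dict lookup per distinct needle length (6) per position.
import Mathlib
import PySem

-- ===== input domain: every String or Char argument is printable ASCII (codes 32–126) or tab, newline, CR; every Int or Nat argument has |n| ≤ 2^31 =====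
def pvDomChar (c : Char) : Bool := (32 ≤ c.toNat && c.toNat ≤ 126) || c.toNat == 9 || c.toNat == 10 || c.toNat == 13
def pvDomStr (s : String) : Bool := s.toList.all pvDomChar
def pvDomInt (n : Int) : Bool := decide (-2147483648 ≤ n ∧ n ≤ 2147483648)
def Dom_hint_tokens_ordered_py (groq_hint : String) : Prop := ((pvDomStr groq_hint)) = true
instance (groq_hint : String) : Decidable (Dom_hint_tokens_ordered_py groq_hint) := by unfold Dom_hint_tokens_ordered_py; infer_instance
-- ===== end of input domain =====

-- B replaces A's per-position linear scan over all 44 needles by one hash-table lookup per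
-- distinct needle length (6 of them), built once as a needle→canonical-symbol dict (objective: alternative).

-- ===== PORT A =====
-- Module constants (dict[str, str], insertion order).
def celoTokens : PySem.Dict String String := PySem.Dict.ofList [
        ("CELO", "0x471EcE3750Da237f93B8E339c536989b8978a438"),
    ("STCELO", "0xC668583dcbDc9ae6FA3CE46462758188adfdfC24"),
    ("SCELO", "0xC668583dcbDc9ae6FA3CE46462758188adfdfC24"),
    ("USDm", "0x765DE816845861e75a25fca122bb6898B8B1282a"),
    ("CUSD", "0x765DE816845861e75a25fca122bb6898B8B1282a"),
    ("CEUR", "0xD8763CBa276a3738E6DE85b4b3bF5FDed6D6cA73"),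
    ("CREAL", "0xe8537a3d056DA446677B9E9d6c5dB704EaAb4787"),
    ("EXOFX", "0x06b6E03Bc9711eeb58D5A381a476019E19FDDEc4"),
    ("CKES", "0x456a3D042C0DbD3db53D5489e98dFb038553B0d0"),
    ("USDC", "0xceba9300f2b948710d2653dD7B07f33A8B32118C"),
    ("USDT", "0x48065fbBE25f71C9282ddf5e1cD6D6A887483D5e"),
    ("WETH", "0xD221812de1BD094f35587EE8E174B07B6167D9Af"),
    ("WBTC", "0x8aC2901Dd8A1F17a1A4768A6bA4C3751e3995B2D"),
    ("AXLUSDC", "0xEB466342C4d449BC9f53A865D5Cb90586f405215"),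
    ("AXLETH", "0xb829b68f57CC546dA7E5806A929e53bE32a4625D"),
    ("WBNB", "0xBf2554ce8A4D1351AFeB1aC3E5545AaF7591042d"),
    ("WAVAX", "0xFFdb274b4909fC2efE26C8e4Ddc9fe91963cAA4d"),
    ("WFTM", "0xd1A342eE2210238233a347FEd61EE7Faf9f251ce"),
    ("WMATIC", "0x9C234706292b1144133ED509ccc5B3CD193BF712"),
    ("UBE", "0x71e26d0E519D14591b9dE9a0fE9513A398101490"),
    ("MOO", "0x17700282592D6917F6A73D0bF8AcCf4D578c131e"),
    ("UNI", "0xeE571697998ec64e32B57D754D700c4dda2f2a0e"),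
    ("SUSHI", "0x29dFce9c22003A4999930382Fd00f9Fd6133Acd1"),
    ("CRV", "0x173fd7434B8B50dF08e3298f173487ebDB35FD14"),
    ("SYMM", "0x8427bD503dd3169cCC9aFF7326c15258Bc305478"),
    ("HALOFI", "0xA553FeDB4EEc005C0480172199B0B24307FFd0Ae"),
    ("ARI", "0x745f233f80F7ddA3073755e50Fa32F4B8A6A1574"),
    ("PACT", "0x46c9757C5497c5B1f2eb73aE79b6B67D119B0B58"),
    ("USDGLO", "0x4F604735c1cF31399C6E711D5962b2B3E0225AD3"),
    ("GLO", "0x4F604735c1cF31399C6E711D5962b2B3E0225AD3"),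
    ("G", "0x62B8B11039FcfE5aB0C56E502b1C372A3d2a9c7A"),
    ("NCT", "0x02De4766C272abc10Bc88c220D214A26960a7e92"),
    ("MCO2", "0x7Ff9DF85a856DB9CD644Ce4032fdf60a7Ad8B0Cc"),
    ("CMCO2", "0x32A9FE697a32135BFd313a6Ac28792DaE4D9979d"),
    ("PLASTIK", "0x27cd006548dF7C8c8e9fdc4A67fa05C2E3CA5CF9"),
    ("JMPT", "0x1d18d0386F51ab03E7E84E71BdA1681EbA865F1f")]

def tokenAliases : PySem.Dict String String := PySem.Dict.ofList [
        ("CUSD", "USDm"),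
    ("STABLE", "USDm"),
    ("CUSDT", "USDT"),
    ("ETH", "WETH"),
    ("BTC", "WBTC"),
    ("SYRUP", "SYMM"),
    ("HALO", "HALOFI"),
    ("EXOF", "EXOFX"),
    ("GD", "G"),
    ("G$", "G"),
    ("GOODDOLLAR", "G")]

-- needles: list of (needle, canon).  The needle str is represented as its List Char
-- (same code points; all matching in A is done per code point).
def needlesA : List (List Char × String) :=
  let n1 := celoTokens.keys.foldl
    (fun acc k => if 3 ≤ k.toList.length then acc ++ [(k.toList, k)] else acc) []
  tokenAliases.items.foldl
    (fun acc p => if 3 ≤ p.1.toList.length && celoTokens.contains p.2 then acc ++ [(p.1.toList, p.2)] else acc) n1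

-- needles.sort(key=lambda x: len(x[0]), reverse=True)  (Python's stable sort)
def sortedNeedlesA : List (List Char × String) :=
  PySem.List.sorted needlesA (fun nc => nc.1.length) true

-- the inner `for needle, canon in needles: if hint.startswith(needle, pos): break` loop;
-- hint.startswith(needle, pos) for 0 ≤ pos is exactly startswith of the pos-suffix.
def stepA (cs : List Char) : Option (List Char × String) :=
  sortedNeedlesA.find? (fun nc => PySem.Chars.startswith cs nc.1)

-- the `while pos < len(hint)` loop.  pos strictly increases each iteration, so
-- fuel = len(hint) bounds the number of iterations (the loop exits once pos ≥ len(hint)).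
def loopA (hint : List Char) : Nat → Nat → List String → PySem.Set String → List String
  | 0, _, ordered, _ => ordered
  | fuel + 1, pos, ordered, seen =>
    if pos < hint.length then
      match stepA (hint.drop pos) with
      | some nc =>
          if PySem.Set.contains seen nc.2 then
            loopA hint fuel (pos + nc.1.length) ordered seen
          else
            loopA hint fuel (pos + nc.1.length) (ordered ++ [nc.2]) (PySem.Set.add seen nc.2)
      | none => loopA hint fuel (pos + 1) ordered seen
    else ordered

def hint_tokens_ordered_py (groq_hint : String) : List String :=
  -- hint = (groq_hint or "").upper(); for a str, (s or "") is "" iff s == ""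
  let hint := PySem.Chars.upper (if groq_hint = "" then "" else groq_hint).toList
  loopA hint hint.length 0 [] PySem.Set.empty

-- ===== PORT B =====
-- needle → canonical symbol; setdefault keeps the first (token) mapping on duplicates.
-- Keys (str) are represented as their List Char, as on the A side.
def needleTable : PySem.Dict (List Char) String :=
  let t1 := celoTokens.keys.foldl
    (fun d k => if 3 ≤ k.toList.length then d.setdefault k.toList k else d) PySem.Dict.empty
  tokenAliases.items.foldl
    (fun d p => if 3 ≤ p.1.toList.length && celoTokens.contains p.2 then d.setdefault p.1.toList p.2 else d) t1

-- lengths = sorted({len(k) for k in table}, reverse=True)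
def needleLengthsB : List Nat :=
  PySem.List.sorted (PySem.Set.ofList (needleTable.keys.map List.length)) (fun x => x) true

-- the inner `for L in lengths: … break` loop; hint[pos:pos+L] for natural pos
-- is (hint.drop pos).take L (PySem.List.slice_natCast_add).
def stepB (hint : List Char) (pos : Nat) : Option (Nat × String) :=
  needleLengthsB.findSome? (fun L =>
    if pos + L ≤ hint.length then
      (needleTable.get? ((hint.drop pos).take L)).map (fun c => (L, c))
    else none)

-- the `while pos < n` loop; as in loopA, fuel = len(hint) bounds the iteration count.
def loopB (hint : List Char) : Nat → Nat → List String → PySem.Set String → List String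
  | 0, _, ordered, _ => ordered
  | fuel + 1, pos, ordered, seen =>
    if pos < hint.length then
      match stepB hint pos with
      | some Lc =>
          if PySem.Set.contains seen Lc.2 then
            loopB hint fuel (pos + Lc.1) ordered seen
          else
            loopB hint fuel (pos + Lc.1) (ordered ++ [Lc.2]) (PySem.Set.add seen Lc.2)
      | none => loopB hint fuel (pos + 1) ordered seen
    else ordered

def hint_tokens_ordered_py_alt (groq_hint : String) : List String :=
  let hint := PySem.Chars.upper (if groq_hint = "" then "" else groq_hint).toList
  loopB hint hint.length 0 [] PySem.Set.empty

-- ===== PRECONDITION & SPEC =====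
def Spec_hint_tokens_ordered_py (groq_hint : String) (out : List String) : Prop := out = hint_tokens_ordered_py_alt groq_hint
instance (groq_hint : String) (out : List String) : Decidable (Spec_hint_tokens_ordered_py groq_hint out) := by unfold Spec_hint_tokens_ordered_py; infer_instance

-- ===== CLAIM (what is proved, stated in full; the proofs are below) =====
def Claim_equal_hint_tokens_ordered_py : Prop := ∀ (groq_hint : String), Dom_hint_tokens_ordered_py groq_hint → Spec_hint_tokens_ordered_py groq_hint (hint_tokens_ordered_py groq_hint)

-- ===== LEMMAS AND PROOFS =====

-- A's sorted needle list, split into its maximal runs of equal needle length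
-- (10, 7, 6, 5, 4, 3; Python's sort is stable, so each run keeps insertion order).
def g10 : List (List Char × String) := [("GOODDOLLAR".toList, "G")]
def g7 : List (List Char × String) := [("AXLUSDC".toList, "AXLUSDC"), ("PLASTIK".toList, "PLASTIK")]
def g6 : List (List Char × String) := [("STCELO".toList, "STCELO"), ("AXLETH".toList, "AXLETH"), ("WMATIC".toList, "WMATIC"), ("HALOFI".toList, "HALOFI"), ("USDGLO".toList, "USDGLO"), ("STABLE".toList, "USDm")]
def g5 : List (List Char × String) := [("SCELO".toList, "SCELO"), ("CREAL".toList, "CREAL"), ("EXOFX".toList, "EXOFX"), ("WAVAX".toList, "WAVAX"), ("SUSHI".toList, "SUSHI"), ("CMCO2".toList, "CMCO2"), ("CUSDT".toList, "USDT"), ("SYRUP".toList, "SYMM")]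
def g4 : List (List Char × String) := [("CELO".toList, "CELO"), ("USDm".toList, "USDm"), ("CUSD".toList, "CUSD"), ("CEUR".toList, "CEUR"), ("CKES".toList, "CKES"), ("USDC".toList, "USDC"), ("USDT".toList, "USDT"), ("WETH".toList, "WETH"), ("WBTC".toList, "WBTC"), ("WBNB".toList, "WBNB"), ("WFTM".toList, "WFTM"), ("SYMM".toList, "SYMM"), ("PACT".toList, "PACT"), ("MCO2".toList, "MCO2"), ("JMPT".toList, "JMPT"), ("CUSD".toList, "USDm"), ("HALO".toList, "HALOFI"), ("EXOF".toList, "EXOFX")]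
def g3 : List (List Char × String) := [("UBE".toList, "UBE"), ("MOO".toList, "MOO"), ("UNI".toList, "UNI"), ("CRV".toList, "CRV"), ("ARI".toList, "ARI"), ("GLO".toList, "GLO"), ("NCT".toList, "NCT"), ("ETH".toList, "WETH"), ("BTC".toList, "WBTC")]
set_option maxRecDepth 8192 in
lemma sortedNeedlesA_eq : sortedNeedlesA = g10 ++ (g7 ++ (g6 ++ (g5 ++ (g4 ++ g3)))) := by decide

set_option maxRecDepth 8192 in
lemma needleLengthsB_eq : needleLengthsB = [10, 7, 6, 5, 4, 3] := by decide

-- B's needle table as a literal association list (43 keys; the duplicate needle "CUSD"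
-- kept its first, token mapping via setdefault).
def tableList : List (List Char × String) := [
    ("CELO".toList, "CELO"),
    ("STCELO".toList, "STCELO"),
    ("SCELO".toList, "SCELO"),
    ("USDm".toList, "USDm"),
    ("CUSD".toList, "CUSD"),
    ("CEUR".toList, "CEUR"),
    ("CREAL".toList, "CREAL"),
    ("EXOFX".toList, "EXOFX"),
    ("CKES".toList, "CKES"),
    ("USDC".toList, "USDC"),
    ("USDT".toList, "USDT"),
    ("WETH".toList, "WETH"),
    ("WBTC".toList, "WBTC"),
    ("AXLUSDC".toList, "AXLUSDC"),
    ("AXLETH".toList, "AXLETH"),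
    ("WBNB".toList, "WBNB"),
    ("WAVAX".toList, "WAVAX"),
    ("WFTM".toList, "WFTM"),
    ("WMATIC".toList, "WMATIC"),
    ("UBE".toList, "UBE"),
    ("MOO".toList, "MOO"),
    ("UNI".toList, "UNI"),
    ("SUSHI".toList, "SUSHI"),
    ("CRV".toList, "CRV"),
    ("SYMM".toList, "SYMM"),
    ("HALOFI".toList, "HALOFI"),
    ("ARI".toList, "ARI"),
    ("PACT".toList, "PACT"),
    ("USDGLO".toList, "USDGLO"),
    ("GLO".toList, "GLO"),
    ("NCT".toList, "NCT"),
    ("MCO2".toList, "MCO2"),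
    ("CMCO2".toList, "CMCO2"),
    ("PLASTIK".toList, "PLASTIK"),
    ("JMPT".toList, "JMPT"),
    ("STABLE".toList, "USDm"),
    ("CUSDT".toList, "USDT"),
    ("ETH".toList, "WETH"),
    ("BTC".toList, "WBTC"),
    ("SYRUP".toList, "SYMM"),
    ("HALO".toList, "HALOFI"),
    ("EXOF".toList, "EXOFX"),
    ("GOODDOLLAR".toList, "G")]

set_option maxRecDepth 8192 in
lemma needleTable_eq : needleTable = PySem.Dict.mk tableList := by decide

-- g4 with its duplicate needle "CUSD" (alias entry) removed splits as g4pre ++ g4post.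
def g4pre : List (List Char × String) := [("CELO".toList, "CELO"), ("USDm".toList, "USDm"), ("CUSD".toList, "CUSD"), ("CEUR".toList, "CEUR"), ("CKES".toList, "CKES"), ("USDC".toList, "USDC"), ("USDT".toList, "USDT"), ("WETH".toList, "WETH"), ("WBTC".toList, "WBTC"), ("WBNB".toList, "WBNB"), ("WFTM".toList, "WFTM"), ("SYMM".toList, "SYMM"), ("PACT".toList, "PACT"), ("MCO2".toList, "MCO2"), ("JMPT".toList, "JMPT")]
def g4post : List (List Char × String) := [("HALO".toList, "HALOFI"), ("EXOF".toList, "EXOFX")]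

lemma beq_false_of_length_ne {a b : List Char} (h : a.length ≠ b.length) : (a == b) = false := by
  simp only [beq_eq_false_iff_ne, ne_eq]
  exact fun e => h (congrArg List.length e)

lemma startswith_false_of_short {cs nd : List Char} (h : cs.length < nd.length) :
    PySem.Chars.startswith cs nd = false := by
  rw [Bool.eq_false_iff]
  intro hh
  exact absurd ((PySem.Chars.startswith_iff cs nd).1 hh).length_le (by omega)

lemma startswith_eq_beq_take {cs nd : List Char} :
    PySem.Chars.startswith cs nd = (nd == cs.take nd.length) := by
  rw [Bool.eq_iff_iff, PySem.Chars.startswith_iff, beq_iff_eq, List.prefix_iff_eq_take]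

lemma find?_grp_none {L : Nat} {G : List (List Char × String)}
    (hG : ∀ p ∈ G, p.1.length = L) {cs : List Char} (h : cs.length < L) :
    G.find? (fun nc => PySem.Chars.startswith cs nc.1) = none := by
  induction G with
  | nil => rfl
  | cons p t ih =>
    rw [List.find?_cons_of_neg, ih (fun q hq => hG q (List.mem_cons_of_mem _ hq))]
    rw [startswith_false_of_short (by rw [hG p List.mem_cons_self]; omega)]
    simp

lemma find?_grp_take {L : Nat} {G : List (List Char × String)}
    (hG : ∀ p ∈ G, p.1.length = L) (cs : List Char) :
    G.find? (fun nc => PySem.Chars.startswith cs nc.1)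
      = G.find? (fun nc => nc.1 == cs.take L) := by
  induction G with
  | nil => rfl
  | cons p t ih =>
    have hp := hG p List.mem_cons_self
    have ht := ih (fun q hq => hG q (List.mem_cons_of_mem _ hq))
    have hb : PySem.Chars.startswith cs p.1 = (p.1 == List.take L cs) := by
      rw [startswith_eq_beq_take, hp]
    cases hcond : (p.1 == List.take L cs) with
    | true => simp only [List.find?_cons, hb, hcond]
    | false => simp only [List.find?_cons, hb, hcond, ht]

lemma map_find?_grp {L : Nat} {G : List (List Char × String)}
    (hG : ∀ p ∈ G, p.1.length = L) (q : (List Char × String) → Bool) :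
    (G.find? q).map (fun nc => (nc.1.length, nc.2))
      = (G.find? q).map (fun nc => (L, nc.2)) := by
  cases h : G.find? q with
  | none => rfl
  | some nc => simp [hG nc (List.mem_of_find?_eq_some h)]

lemma findSome?_cons_or {α β : Type} (f : α → Option β) (a : α) (l : List α) :
    List.findSome? f (a :: l) = (f a).or (List.findSome? f l) := by
  rw [List.findSome?_cons]
  cases f a <;> rfl

lemma map_or {α β : Type} (f : α → β) (o o' : Option α) :
    (o.or o').map f = (o.map f).or (o'.map f) := by
  cases o <;> rfl

-- get? on a literal dict is first-match lookup in its items list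
lemma get?_mk_eq_find? (l : List (List Char × String)) (t : List Char) :
    (PySem.Dict.mk l).get? t = (l.find? (fun p => p.1 == t)).map (fun p => p.2) := by
  induction l with
  | nil => rfl
  | cons p rest ih =>
    obtain ⟨k, v⟩ := p
    cases hc : (k == t) with
    | true => simp [PySem.Dict.get?_mk_cons, hc]
    | false => simp [PySem.Dict.get?_mk_cons, hc, ih]

-- in a first-match lookup only keys of t's length matter
lemma find?_filter_len (l : List (List Char × String)) (L : Nat) (t : List Char) (ht : t.length = L) :
    l.find? (fun p => p.1 == t) = (l.filter (fun p => p.1.length == L)).find? (fun p => p.1 == t) := by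
  induction l with
  | nil => rfl
  | cons p rest ih =>
    by_cases hl : p.1.length = L
    · cases hc : (p.1 == t) with
      | true => simp [hl, hc]
      | false => simp [hl, hc, ih]
    · have hfl : (p.1.length == L) = false := by simp [hl]
      have hc : (p.1 == t) = false := beq_false_of_length_ne (by omega)
      simp [hfl, hc, ih]

lemma find?_skip {x : List Char × String} (l1 l2 : List (List Char × String))
    (q : (List Char × String) → Bool) (hx : q x = false) :
    List.find? q (l1 ++ x :: l2) = List.find? q (l1 ++ l2) := by
  rw [List.find?_append, List.find?_append, List.find?_cons_of_neg (by simp [hx])]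

-- a later entry with an already-seen key never affects a first-match lookup
lemma find?_dup_drop {x : List Char × String} (l1 l2 : List (List Char × String))
    (t : List Char) (hx : ∃ y ∈ l1, y.1 = x.1) :
    List.find? (fun p => p.1 == t) (l1 ++ x :: l2) = List.find? (fun p => p.1 == t) (l1 ++ l2) := by
  cases hxt : (x.1 == t) with
  | false => exact find?_skip l1 l2 _ hxt
  | true =>
    obtain ⟨y, hy, hyx⟩ := hx
    have hsome : (List.find? (fun p => p.1 == t) l1).isSome := by
      rw [List.find?_isSome]
      exact ⟨y, hy, by rw [hyx]; exact hxt⟩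
    rw [List.find?_append, List.find?_append]
    cases h : List.find? (fun p => p.1 == t) l1 with
    | some v => rfl
    | none => rw [h] at hsome; simp at hsome

-- the length-L run of A's sorted needle list vs. B's table, per length
lemma hG10 : ∀ p ∈ g10, p.1.length = 10 := by decide
lemma hG7 : ∀ p ∈ g7, p.1.length = 7 := by decide
lemma hG6 : ∀ p ∈ g6, p.1.length = 6 := by decide
lemma hG5 : ∀ p ∈ g5, p.1.length = 5 := by decide
lemma hG4 : ∀ p ∈ g4, p.1.length = 4 := by decide
lemma hG3 : ∀ p ∈ g3, p.1.length = 3 := by decide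

set_option maxRecDepth 8192 in
lemma filter_10 : tableList.filter (fun p => p.1.length == 10) = g10 := by decide
set_option maxRecDepth 8192 in
lemma filter_7 : tableList.filter (fun p => p.1.length == 7) = g7 := by decide
set_option maxRecDepth 8192 in
lemma filter_6 : tableList.filter (fun p => p.1.length == 6) = g6 := by decide
set_option maxRecDepth 8192 in
lemma filter_5 : tableList.filter (fun p => p.1.length == 5) = g5 := by decide
set_option maxRecDepth 8192 in
lemma filter_4 : tableList.filter (fun p => p.1.length == 4) = g4pre ++ g4post := by decide
set_option maxRecDepth 8192 in
lemma filter_3 : tableList.filter (fun p => p.1.length == 3) = g3 := by decide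
set_option maxRecDepth 8192 in
lemma g4_eq : g4 = g4pre ++ ("CUSD".toList, "USDm") :: g4post := by decide

lemma htab10 : ∀ t : List Char, t.length = 10 → needleTable.get? t = (g10.find? (fun p => p.1 == t)).map (fun p => p.2) := by
  intro t ht; rw [needleTable_eq, get?_mk_eq_find?, find?_filter_len _ 10 t ht, filter_10]
lemma htab7 : ∀ t : List Char, t.length = 7 → needleTable.get? t = (g7.find? (fun p => p.1 == t)).map (fun p => p.2) := by
  intro t ht; rw [needleTable_eq, get?_mk_eq_find?, find?_filter_len _ 7 t ht, filter_7]
lemma htab6 : ∀ t : List Char, t.length = 6 → needleTable.get? t = (g6.find? (fun p => p.1 == t)).map (fun p => p.2) := by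
  intro t ht; rw [needleTable_eq, get?_mk_eq_find?, find?_filter_len _ 6 t ht, filter_6]
lemma htab5 : ∀ t : List Char, t.length = 5 → needleTable.get? t = (g5.find? (fun p => p.1 == t)).map (fun p => p.2) := by
  intro t ht; rw [needleTable_eq, get?_mk_eq_find?, find?_filter_len _ 5 t ht, filter_5]
lemma htab4 : ∀ t : List Char, t.length = 4 → needleTable.get? t = (g4.find? (fun p => p.1 == t)).map (fun p => p.2) := by
  intro t ht
  rw [needleTable_eq, get?_mk_eq_find?, find?_filter_len _ 4 t ht, filter_4, g4_eq,
    find?_dup_drop (x := ("CUSD".toList, "USDm")) g4pre g4post t ⟨("CUSD".toList, "CUSD"), by decide, rfl⟩]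
lemma htab3 : ∀ t : List Char, t.length = 3 → needleTable.get? t = (g3.find? (fun p => p.1 == t)).map (fun p => p.2) := by
  intro t ht; rw [needleTable_eq, get?_mk_eq_find?, find?_filter_len _ 3 t ht, filter_3]

-- one length-run of A's scan equals B's guarded table lookup at that length
lemma seg_core {L : Nat} {G : List (List Char × String)} (hG : ∀ p ∈ G, p.1.length = L)
    (htab : ∀ t : List Char, t.length = L → needleTable.get? t = (G.find? (fun p => p.1 == t)).map (fun p => p.2))
    (cs : List Char) :
    (G.find? (fun nc => PySem.Chars.startswith cs nc.1)).map (fun nc => (nc.1.length, nc.2))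
      = if L ≤ cs.length then (needleTable.get? (cs.take L)).map (fun c => (L, c)) else none := by
  by_cases h : L ≤ cs.length
  · rw [if_pos h, find?_grp_take hG, map_find?_grp hG,
      htab (cs.take L) (by rw [List.length_take]; omega)]
    cases G.find? (fun p => p.1 == cs.take L) <;> rfl
  · rw [if_neg h, find?_grp_none hG (by omega)]; rfl

-- the per-position match of A (longest needle wins) equals the per-position match of B
lemma step_eq (hint : List Char) (pos : Nat) (hp : pos ≤ hint.length) :
    (stepA (hint.drop pos)).map (fun nc => (nc.1.length, nc.2)) = stepB hint pos := by
  have hlen : (hint.drop pos).length = hint.length - pos := List.length_drop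
  have hc : ∀ L : Nat, (pos + L ≤ hint.length) = (L ≤ (hint.drop pos).length) := by
    intro L
    rw [hlen]
    exact propext ⟨fun h => by omega, fun h => by omega⟩
  rw [stepB, needleLengthsB_eq, findSome?_cons_or, findSome?_cons_or, findSome?_cons_or,
    findSome?_cons_or, findSome?_cons_or, findSome?_cons_or, List.findSome?_nil, Option.or_none]
  rw [stepA, sortedNeedlesA_eq, List.find?_append, List.find?_append, List.find?_append,
    List.find?_append, List.find?_append, map_or, map_or, map_or, map_or, map_or]
  rw [seg_core hG10 htab10, seg_core hG7 htab7, seg_core hG6 htab6, seg_core hG5 htab5,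
    seg_core hG4 htab4, seg_core hG3 htab3]
  simp only [hc]

-- the two while loops agree step by step
set_option maxRecDepth 100000 in
lemma loopA_succ (hint : List Char) (fuel pos : Nat) (ordered : List String) (seen : PySem.Set String) :
    loopA hint (fuel + 1) pos ordered seen =
      (if pos < hint.length then
        match stepA (hint.drop pos) with
        | some nc =>
            if PySem.Set.contains seen nc.2 then loopA hint fuel (pos + nc.1.length) ordered seen
            else loopA hint fuel (pos + nc.1.length) (ordered ++ [nc.2]) (PySem.Set.add seen nc.2)
        | none => loopA hint fuel (pos + 1) ordered seen
      else ordered) := rfl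

set_option maxRecDepth 100000 in
lemma loopB_succ (hint : List Char) (fuel pos : Nat) (ordered : List String) (seen : PySem.Set String) :
    loopB hint (fuel + 1) pos ordered seen =
      (if pos < hint.length then
        match stepB hint pos with
        | some Lc =>
            if PySem.Set.contains seen Lc.2 then loopB hint fuel (pos + Lc.1) ordered seen
            else loopB hint fuel (pos + Lc.1) (ordered ++ [Lc.2]) (PySem.Set.add seen Lc.2)
        | none => loopB hint fuel (pos + 1) ordered seen
      else ordered) := rfl

lemma loop_eq (hint : List Char) : ∀ (fuel pos : Nat) (ordered : List String) (seen : PySem.Set String),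
    loopA hint fuel pos ordered seen = loopB hint fuel pos ordered seen := by
  intro fuel
  induction fuel with
  | zero => intro pos ordered seen; rfl
  | succ n ih =>
    intro pos ordered seen
    rw [loopA_succ, loopB_succ]
    by_cases hlt : pos < hint.length
    · rw [if_pos hlt, if_pos hlt, ← step_eq hint pos (le_of_lt hlt)]
      cases h : stepA (hint.drop pos) with
      | none => exact ih (pos + 1) ordered seen
      | some nc =>
        simp only [Option.map_some]
        by_cases hs : PySem.Set.contains seen nc.2 = true
        · rw [if_pos hs, if_pos hs]; exact ih _ _ _
        · rw [if_neg hs, if_neg hs]; exact ih _ _ _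
    · rw [if_neg hlt, if_neg hlt]

-- ===== VERDICT (by name: the statement is the Claim_ definition above) =====
theorem hint_tokens_ordered_py_spec : Claim_equal_hint_tokens_ordered_py := by
  intro groq_hint _
  unfold Spec_hint_tokens_ordered_py hint_tokens_ordered_py hint_tokens_ordered_py_alt
  exact loop_eq _ _ 0 [] PySem.Set.empty
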